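-- pv_equiv track=rewrite | github.com/lu1um/TIL | kakao/순위검색.py | solution
-- ===== SOURCE A (Python) =====
-- def solution(info, query):
--     N = len(info)
--     participants = [[''] * 5 for _ in range(N)]
--     for i in range(N):
--         for j, s in enumerate(info[i].split()):
--             participants[i][j] = s
--
--     answer = [0] * len(query)
--     for idx, qr in enumerate(query):
--         candidate = [1] * N
--         for i, q in enumerate(qr.split(' and ')):
--             if q == '-':
--                 continue
--             if i == 3:
--                 food, score = q.split()
--                 if food != '-':
--                     for j in range(N):
--                         if not candidate[j]:
--                             continue
--                         if not participants[j][3] == food: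
--                             candidate[j] = 0
--                 for j in range(N):
--                     if not candidate[j]:
--                         continue
--                     if int(participants[j][4]) < int(score):
--                         candidate[j] = 0
--             else:
--                 for j in range(N):
--                     if not candidate[j]:
--                         continue
--                     if not participants[j][i] == q:
--                         candidate[j] = 0
--         answer[idx] = sum(candidate)
--     return answer
-- ===== SOURCE B (Python) =====
-- def solution(info, query):
--     # Pre-split each participant once into a padded 5-field record.  Each query is
--     # compiled ONCE into a list of positional equality checks plus an optional food
--     # value and minimum score; one early-exit pass over the records then counts matches
--     # (no per-clause sieve passes, no candidate array).
--     people = [(line.split() + [''] * 5)[:5] for line in info]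
--     answer = []
--     for qr in query:
--         checks = []
--         food = None
--         minscore = None
--         for i, q in enumerate(qr.split(' and ')):
--             if q == '-':
--                 continue
--             if i == 3:
--                 w, s = q.split()
--                 if w != '-':
--                     food = w
--                 minscore = int(s)
--             else:
--                 checks.append((i, q))
--         cnt = 0
--         for f in people:
--             for i, v in checks:
--                 if f[i] != v:
--                     break
--             else:
--                 if food is not None and f[3] != food:
--                     continue
--                 if minscore is not None and int(f[4]) < minscore:
--                     continue
--                 cnt += 1
--         answer.append(cnt)
--     return answer
-- ===== Notes on version B (the rewrite author's own statement) =====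
-- stated objective: alternative
-- what changed: A answers each query by sieving a 0/1 candidate array with one full pass over all participants per query clause; B pre-pads each participant record once, compiles each query once into positional equality checks plus an optional food value and minimum score, and counts matches in a single early-exit pass per query (no candidate array, no per-clause passes).
-- outside the precondition, e.g. on solution(['a b'], ['- and - and - and x 50']): A returns [0], B returns [0]; on solution(['a b'], ['z and - and - and - and - and x']): A returns [0], B returns [0]; on solution([], ['- and - and - and - x']): A returns [0], B raises ValueError
import Mathlib
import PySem

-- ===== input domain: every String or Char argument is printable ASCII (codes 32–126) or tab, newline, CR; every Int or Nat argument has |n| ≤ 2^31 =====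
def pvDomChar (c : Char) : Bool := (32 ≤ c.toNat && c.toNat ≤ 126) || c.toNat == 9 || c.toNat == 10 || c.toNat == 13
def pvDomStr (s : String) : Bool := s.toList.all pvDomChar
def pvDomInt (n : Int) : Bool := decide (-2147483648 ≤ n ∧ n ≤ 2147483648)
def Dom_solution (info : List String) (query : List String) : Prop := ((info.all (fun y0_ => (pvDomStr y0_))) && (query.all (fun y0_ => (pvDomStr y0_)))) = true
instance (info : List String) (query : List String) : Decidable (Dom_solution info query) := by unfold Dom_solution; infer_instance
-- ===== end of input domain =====

-- B compiles each query once into positional checks + optional food/min-score and counts matches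
-- in one early-exit pass per query, instead of A's per-clause sieve passes over a 0/1 candidate
-- array; alternative structure, same results on Pre_.


-- int(s); Python's ValueError (ofStr? = none) mapped to 0 — such inputs are outside Pre_solution
def pvIntOf (s : String) : Int := (PySem.Int.ofStr? s).getD 0

-- ===== PORT A =====
-- participants[i][j] = s over enumerate(info[i].split()); a set at j ≥ 5 (IndexError in Python,
-- outside Pre_solution) is a no-op here
def pvFillRowAux : List String → Nat → List String → List String
  | row, _, [] => row
  | row, j, t :: ts => pvFillRowAux (row.set j t) (j + 1) ts

def pvFillRow (s : String) : List String :=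
  pvFillRowAux ["", "", "", "", ""] 0 (PySem.Str.split₀ s)

-- qr.split(' and '): the separator is non-empty, so split? is always some (getD [] never fires)
-- the 'for i, q in enumerate(qr.split(' and '))' loop: each clause is one (or two) full
-- zeroing passes over the candidate array, exactly as in A
def pvSieve (people : List (List String)) : Nat → List String → List Int → List Int
  | _, [], cand => cand
  | i, q :: rest, cand =>
    pvSieve people (i + 1) rest
      (if q = "-" then cand
       else if i = 3 then
         let toks := PySem.Str.split₀ q
         let food := toks[0]?.getD ""
         let score := toks[1]?.getD ""
         let cand1 := if food ≠ "-" then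
             List.zipWith (fun c p => if c ≠ (0 : Int) ∧ p[3]?.getD "" ≠ food then 0 else c) cand people
           else cand
         List.zipWith (fun c p => if c ≠ (0 : Int) ∧ pvIntOf (p[4]?.getD "") < pvIntOf score then 0 else c) cand1 people
       else
         List.zipWith (fun c p => if c ≠ (0 : Int) ∧ p[i]?.getD "" ≠ q then 0 else c) cand people)

def solution (info : List String) (query : List String) : List Int :=
  let participants := info.map pvFillRow
  query.map (fun qr =>
    (pvSieve participants 0 ((PySem.Str.split? qr " and ").getD [])
      (List.replicate info.length (1 : Int))).foldl (· + ·) 0)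

-- ===== PORT B =====
def pvRow (s : String) : List String :=
  (PySem.Str.split₀ s ++ ["", "", "", "", ""]).take 5

-- B's query-compilation loop: positional equality checks, optional food value, optional min score
def pvCompileAux : List (Nat × String) → Option String → Option Int → Nat → List String →
    List (Nat × String) × Option String × Option Int
  | cs, fd, ms, _, [] => (cs, fd, ms)
  | cs, fd, ms, i, q :: rest =>
    if q = "-" then pvCompileAux cs fd ms (i + 1) rest
    else if i = 3 then
      let toks := PySem.Str.split₀ q
      let w := toks[0]?.getD ""
      let s := toks[1]?.getD ""
      pvCompileAux cs (if w ≠ "-" then some w else fd) (some (pvIntOf s)) (i + 1) rest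
    else pvCompileAux (cs ++ [(i, q)]) fd ms (i + 1) rest

-- B's early-exit pass over one record: the for/break/else over checks, then the two continues
def pvMatch (f : List String) (cs : List (Nat × String)) (fd : Option String) (ms : Option Int) : Bool :=
  cs.all (fun iv => f[iv.1]?.getD "" = iv.2) &&
  (match fd with | some w => decide (f[3]?.getD "" = w) | none => true) &&
  (match ms with | some m => decide (¬ pvIntOf (f[4]?.getD "") < m) | none => true)

def solution_alt (info : List String) (query : List String) : List Int :=
  let people := info.map pvRow
  query.map (fun qr =>
    let c := pvCompileAux [] none none 0 ((PySem.Str.split? qr " and ").getD [])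
    ((people.countP (fun f => pvMatch f c.1 c.2.1 c.2.2)) : Int))

-- ===== PRECONDITION & SPEC =====
-- Pre_ excludes exactly the shapes on which Python A can raise: an info row with more than 5
-- whitespace tokens (IndexError), a query with more than 5 ' and '-clauses (IndexError), and a
-- triggered food/score clause whose clause does not split into exactly 2 tokens (ValueError) or
-- whose score / participant 5th field is not int-parseable (ValueError).  This is slightly
-- narrower than A's exact returning domain: when every candidate is already dead (or info = [])
-- A's lazy inner loops can still return on such inputs — see the cited excluded examples.
def Pre_solution (info : List String) (query : List String) : Prop :=
  (∀ s ∈ info, (PySem.Str.split₀ s).length ≤ 5) ∧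
  ∀ qr ∈ query,
    ((PySem.Str.split? qr " and ").getD []).length ≤ 5 ∧
    (4 ≤ ((PySem.Str.split? qr " and ").getD []).length →
     ((PySem.Str.split? qr " and ").getD [])[3]?.getD "" ≠ "-" →
       (PySem.Str.split₀ (((PySem.Str.split? qr " and ").getD [])[3]?.getD "")).length = 2 ∧
       (PySem.Int.ofStr? ((PySem.Str.split₀ (((PySem.Str.split? qr " and ").getD [])[3]?.getD "")).getD 1 "")).isSome = true ∧
       ∀ s ∈ info, (PySem.Str.split₀ s).length = 5 ∧
         (PySem.Int.ofStr? ((PySem.Str.split₀ s).getD 4 "")).isSome = true)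

instance (info : List String) (query : List String) : Decidable (Pre_solution info query) := by
  unfold Pre_solution; infer_instance

def pvWitness_solution : List String × List String :=
  (["java backend junior pizza 150"],
   ["java and backend and junior and pizza 100", "- and - and - and - 0", "cpp"])

def Spec_solution (info : List String) (query : List String) (out : List Int) : Prop := out = solution_alt info query
instance (info : List String) (query : List String) (out : List Int) : Decidable (Spec_solution info query out) := by unfold Spec_solution; infer_instance

-- ===== CLAIM (what is proved, stated in full; the proofs are below) =====
def Claim_equal_solution : Prop := ∀ (info : List String) (query : List String), Dom_solution info query → Pre_solution info query → Spec_solution info query (solution info query)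

-- ===== LEMMAS AND PROOFS =====

-- proof-side characterisation of one record's fate under A's sieve, clause by clause
def pvOk (f : List String) : Nat → List String → Bool
  | _, [] => true
  | i, q :: rest =>
    if q = "-" then pvOk f (i + 1) rest
    else if i = 3 then
      let toks := PySem.Str.split₀ q
      let food := toks[0]?.getD ""
      let score := toks[1]?.getD ""
      if food ≠ "-" ∧ f[3]?.getD "" ≠ food then false
      else if pvIntOf (f[4]?.getD "") < pvIntOf score then false
      else pvOk f (i + 1) rest
    else if f[i]?.getD "" ≠ q then false
    else pvOk f (i + 1) rest

theorem pvFillRowAux_oob (ts : List String) (j : Nat) (row : List String)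
    (h : row.length ≤ j) : pvFillRowAux row j ts = row := by
  induction ts generalizing j row with
  | nil => rfl
  | cons t ts ih =>
    have hset : row.set j t = row := List.set_eq_of_length_le h
    simp [pvFillRowAux, hset]
    exact ih (j + 1) row (by omega)

theorem pvRow_eq (s : String) : pvFillRow s = pvRow s := by
  unfold pvFillRow pvRow
  rcases h : PySem.Str.split₀ s with _ | ⟨a, _ | ⟨b, _ | ⟨c, _ | ⟨d, _ | ⟨e, rest⟩⟩⟩⟩⟩ <;>
    simp [pvFillRowAux, List.set]
  exact pvFillRowAux_oob rest 5 [a, b, c, d, e] (by simp)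

theorem zipWith_map_self {α β : Type} (u : β → α → β) (h : α → β) (l : List α) :
    List.zipWith u (l.map h) l = l.map (fun x => u (h x) x) := by
  induction l with
  | nil => rfl
  | cons x xs ih => simp [ih]

theorem sieve_pass {α : Type} (g : α → Bool) (p : α → Prop) [DecidablePred p] (people : List α) :
    List.zipWith (fun c f => if c ≠ (0 : Int) ∧ p f then 0 else c)
      (people.map (fun f => if g f then (1 : Int) else 0)) people
    = people.map (fun f => if g f && !decide (p f) then (1 : Int) else 0) := by
  rw [zipWith_map_self]
  apply List.map_congr_left
  intro f _
  by_cases hg : g f <;> by_cases hp : p f <;> simp [hg, hp]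

theorem pvSieve_eq (people : List (List String)) (parts : List String) (i : Nat)
    (g : List String → Bool) :
    pvSieve people i parts (people.map (fun f => if g f then (1 : Int) else 0))
    = people.map (fun f => if g f && pvOk f i parts then (1 : Int) else 0) := by
  induction parts generalizing i g with
  | nil => simp [pvSieve, pvOk]
  | cons q rest ih =>
    by_cases hq : q = "-"
    · simp only [pvSieve, if_pos hq]
      rw [ih]
      apply List.map_congr_left
      intro f _
      rw [pvOk, if_pos hq]
    · by_cases hi : i = 3
      · subst hi
        simp only [pvSieve, pvOk, if_neg hq, reduceIte]
        by_cases hf : (PySem.Str.split₀ q)[0]?.getD "" ≠ "-"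
        · rw [if_pos hf, sieve_pass, sieve_pass, ih]
          apply List.map_congr_left
          intro f _
          by_cases h1 : (f[3]?.getD "" ≠ (PySem.Str.split₀ q)[0]?.getD "") <;>
            by_cases h2 : pvIntOf (f[4]?.getD "") < pvIntOf ((PySem.Str.split₀ q)[1]?.getD "") <;>
              by_cases hg : g f <;> simp_all [List.getD_eq_getElem?_getD]
        · rw [if_neg hf, sieve_pass, ih]
          apply List.map_congr_left
          intro f _
          by_cases h2 : pvIntOf (f[4]?.getD "") < pvIntOf ((PySem.Str.split₀ q)[1]?.getD "") <;>
            by_cases hg : g f <;> simp_all [List.getD_eq_getElem?_getD]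
      · simp only [pvSieve, pvOk, if_neg hq, if_neg hi]
        rw [sieve_pass, ih]
        apply List.map_congr_left
        intro f _
        by_cases h1 : (f[i]?.getD "" ≠ q) <;> by_cases hg : g f <;>
          simp_all [List.getD_eq_getElem?_getD, and_assoc]

theorem pvMatch_append (f : List String) (cs : List (Nat × String)) (i : Nat) (q : String)
    (fd : Option String) (ms : Option Int) :
    pvMatch f (cs ++ [(i, q)]) fd ms
    = (pvMatch f cs fd ms && decide (f[i]?.getD "" = q)) := by
  cases fd <;> cases ms <;>
    simp [pvMatch, List.all_append, Bool.and_assoc, Bool.and_comm, Bool.and_left_comm]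

theorem pvMatch_compile (parts : List String) (f : List String) :
    ∀ (i : Nat) (cs : List (Nat × String)) (fd : Option String) (ms : Option Int),
    (3 < i ∨ (fd = none ∧ ms = none)) →
    pvMatch f (pvCompileAux cs fd ms i parts).1 (pvCompileAux cs fd ms i parts).2.1
      (pvCompileAux cs fd ms i parts).2.2
    = (pvMatch f cs fd ms && pvOk f i parts) := by
  induction parts with
  | nil => intro i cs fd ms _; simp [pvCompileAux, pvOk]
  | cons q rest ih =>
    intro i cs fd ms h
    by_cases hq : q = "-"
    · simp only [pvCompileAux, if_pos hq]
      rw [ih (i + 1) cs fd ms (by rcases h with h | h; exacts [Or.inl (by omega), Or.inr h])]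
      rw [pvOk, if_pos hq]
    · by_cases hi : i = 3
      · subst hi
        obtain ⟨hfd, hms⟩ : fd = none ∧ ms = none := by
          rcases h with h | h
          · omega
          · exact h
        subst hfd; subst hms
        simp only [pvCompileAux, pvOk, if_neg hq, reduceIte]
        rw [ih 4 cs _ _ (by left; omega)]
        by_cases hw : (PySem.Str.split₀ q)[0]?.getD "" ≠ "-" <;>
          by_cases h1 : (f[3]?.getD "" = (PySem.Str.split₀ q)[0]?.getD "") <;>
            by_cases h2 : pvIntOf (f[4]?.getD "") < pvIntOf ((PySem.Str.split₀ q)[1]?.getD "") <;>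
              simp [pvMatch, hw, h1, h2, Bool.and_assoc, Bool.and_comm, Bool.and_left_comm]
      · simp only [pvCompileAux, pvOk, if_neg hq, if_neg hi]
        rw [ih (i + 1) _ fd ms (by rcases h with h | h; exacts [Or.inl (by omega), Or.inr h])]
        rw [pvMatch_append]
        by_cases h1 : (f[i]?.getD "" = q) <;>
          simp [h1, Bool.and_assoc, Bool.and_comm, Bool.and_left_comm]

theorem foldl_sum_ite {α : Type} (p : α → Bool) (l : List α) (a : Int) :
    (l.map (fun f => if p f then (1 : Int) else 0)).foldl (· + ·) a = a + (l.countP p : Int) := by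
  induction l generalizing a with
  | nil => simp
  | cons x xs ih =>
    by_cases hx : p x
    · simp [hx, ih]
      ring
    · simp [hx, ih]

-- ===== VERDICT (by name: the statement is the Claim_ definition above) =====
theorem solution_spec : Claim_equal_solution := by
  intro info query _dom _pre
  unfold Spec_solution
  show solution info query = solution_alt info query
  simp only [solution, solution_alt]
  have hrow : pvFillRow = pvRow := funext pvRow_eq
  rw [hrow]
  apply List.map_congr_left
  intro qr _
  have hrep : List.replicate info.length (1 : Int)
      = (info.map pvRow).map (fun f => if (fun _ => true) f then (1 : Int) else 0) := by
    have h : ∀ (l : List (List String)),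
        l.map (fun f => if (fun _ => true) f then (1 : Int) else 0) = List.replicate l.length 1 := by
      intro l; induction l with
      | nil => rfl
      | cons x xs ihl => simp [List.replicate_succ]
    rw [h, List.length_map]
  rw [hrep, pvSieve_eq, foldl_sum_ite]
  have hcnt : ∀ f, pvMatch f (pvCompileAux [] none none 0 ((PySem.Str.split? qr " and ").getD [])).1
      (pvCompileAux [] none none 0 ((PySem.Str.split? qr " and ").getD [])).2.1
      (pvCompileAux [] none none 0 ((PySem.Str.split? qr " and ").getD [])).2.2
      = ((fun _ => true) f && pvOk f 0 ((PySem.Str.split? qr " and ").getD [])) := by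
    intro f
    rw [pvMatch_compile _ f 0 [] none none (Or.inr ⟨rfl, rfl⟩)]
    simp [pvMatch]
  have hc : List.countP (fun f => pvMatch f (pvCompileAux [] none none 0 ((PySem.Str.split? qr " and ").getD [])).1
        (pvCompileAux [] none none 0 ((PySem.Str.split? qr " and ").getD [])).2.1
        (pvCompileAux [] none none 0 ((PySem.Str.split? qr " and ").getD [])).2.2)
        ((info.map pvRow))
      = List.countP (fun f => (fun _ => true) f && pvOk f 0 ((PySem.Str.split? qr " and ").getD [])) (info.map pvRow) :=
    List.countP_congr (fun f _ => by rw [hcnt f])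
  rw [hc]
  simp
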